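-- pv_equiv track=rewrite | github.com/andy1li/codejam | Kickstart/2019/Round A/A. Training/2019k-a-a.py | solve
-- ===== SOURCE A (Python) =====
-- def solve(n, p, skills):
--     psums = [sum(skills[:p])]
--     for i, s in enumerate(skills[p:], start=p):
--         psums.append( psums[-1]+s )
--         psums[-1] -= skills[i-p]
--
--     return min(
--         p*skills[i] - psums[i-(p-1)]
--         for i in range(p-1, len(skills))
--     )
-- ===== SOURCE B (Python) =====
-- def solve(n, p, skills):
--     cum = [0]
--     for s in skills:
--         cum.append(cum[-1] + s)
--     return min(
--         p * skills[i] - (cum[i + 1] - cum[i - p + 1])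
--         for i in range(p - 1, len(skills))
--     )
-- ===== Notes on version B (the rewrite author's own statement) =====
-- stated objective: alternative
-- what changed: Replaces A's incrementally maintained sliding-window sum list (append last+s, then subtract the element leaving the window) with a full cumulative prefix-sum table built in one pass, each window sum then being a cum[i+1]-cum[i-p+1] range query.
import Mathlib
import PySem

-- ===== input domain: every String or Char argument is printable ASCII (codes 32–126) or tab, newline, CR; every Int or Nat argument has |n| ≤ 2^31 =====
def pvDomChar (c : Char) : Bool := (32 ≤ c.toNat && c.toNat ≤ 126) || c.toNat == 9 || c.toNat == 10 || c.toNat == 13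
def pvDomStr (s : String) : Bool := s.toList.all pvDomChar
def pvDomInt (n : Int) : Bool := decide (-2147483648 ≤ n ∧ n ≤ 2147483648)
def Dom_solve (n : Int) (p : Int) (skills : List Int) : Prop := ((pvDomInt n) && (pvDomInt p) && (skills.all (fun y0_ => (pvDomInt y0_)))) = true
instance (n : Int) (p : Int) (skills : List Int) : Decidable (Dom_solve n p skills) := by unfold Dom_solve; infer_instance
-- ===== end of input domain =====

-- B replaces A's incrementally maintained sliding-window list with a plain prefix-sum table
-- queried per window (alternative decomposition, same O(n) cost).

-- ===== PORT A =====
def solve (n : Int) (p : Int) (skills : List Int) : Int :=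
  let psums0 : List Int := [(PySem.List.slice skills none (some p)).sum]
  let psums := (PySem.List.enumerate (PySem.List.slice skills (some p) none) p).foldl
    (fun ps is =>
      ps ++ [PySem.List.pyGetD ps (-1) 0 + is.2 - PySem.List.pyGetD skills (is.1 - p) 0]) psums0
  (PySem.List.min?
    ((PySem.List.pyRange (p - 1) skills.length 1).map
      (fun i => p * PySem.List.pyGetD skills i 0 - PySem.List.pyGetD psums (i - (p - 1)) 0))
    (fun x => x)).getD 0

-- ===== PORT B =====
def solve_alt (n : Int) (p : Int) (skills : List Int) : Int :=
  let cum := skills.foldl (fun c s => c ++ [PySem.List.pyGetD c (-1) 0 + s]) [(0 : Int)]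
  (PySem.List.min?
    ((PySem.List.pyRange (p - 1) skills.length 1).map
      (fun i => p * PySem.List.pyGetD skills i 0 -
        (PySem.List.pyGetD cum (i + 1) 0 - PySem.List.pyGetD cum (i - p + 1) 0)))
    (fun x => x)).getD 0

-- ===== PRECONDITION & SPEC =====
-- Exactly the inputs on which A returns normally: p < 0 always raises IndexError,
-- p = 0 with empty skills raises IndexError, p > len(skills) raises ValueError (empty min).
def Pre_solve (n : Int) (p : Int) (skills : List Int) : Prop :=
  0 ≤ p ∧ p ≤ (skills.length : Int) ∧ (1 ≤ p ∨ 1 ≤ (skills.length : Int))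
instance (n : Int) (p : Int) (skills : List Int) : Decidable (Pre_solve n p skills) := by
  unfold Pre_solve; infer_instance

def pvWitness_solve : Int × Int × List Int := (1, 2, [3, 1, 4])

def Spec_solve (n : Int) (p : Int) (skills : List Int) (out : Int) : Prop := out = solve_alt n p skills
instance (n : Int) (p : Int) (skills : List Int) (out : Int) : Decidable (Spec_solve n p skills out) := by unfold Spec_solve; infer_instance

-- ===== CLAIM (what is proved, stated in full; the proofs are below) =====
def Claim_equal_solve : Prop := ∀ (n : Int) (p : Int) (skills : List Int), Dom_solve n p skills → Pre_solve n p skills → Spec_solve n p skills (solve n p skills)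

-- ===== LEMMAS AND PROOFS =====

/-- prefix sum of the first `j` elements -/
def pvS (skills : List Int) (j : Nat) : Int := (skills.take j).sum

/-- spec of B's cum-building loop -/
def pvPref : List Int → Int → List Int
  | [], a => [a]
  | s :: t, a => a :: pvPref t (a + s)

/-- spec of A's psums-building loop -/
def pvWin (skills : List Int) (p : Int) : List Int → Int → Int → List Int
  | [], _, a => [a]
  | s :: t, i, a => a :: pvWin skills p t (i + 1) (a + s - PySem.List.pyGetD skills (i - p) 0)

theorem pvPref_foldl (xs : List Int) : ∀ (acc : List Int) (a : Int),
    xs.foldl (fun c s => c ++ [PySem.List.pyGetD c (-1) 0 + s]) (acc ++ [a]) = acc ++ pvPref xs a := by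
  induction xs with
  | nil => intro acc a; simp [pvPref]
  | cons s t ih =>
      intro acc a
      simp only [List.foldl_cons, PySem.List.pyGetD_neg_one_append_singleton, pvPref]
      have := ih (acc ++ [a]) (a + s)
      simpa using this

theorem pvWin_foldl (skills : List Int) (p : Int) (ys : List Int) : ∀ (i0 : Int) (acc : List Int) (a : Int),
    (PySem.List.enumerate ys i0).foldl
      (fun ps is => ps ++ [PySem.List.pyGetD ps (-1) 0 + is.2 - PySem.List.pyGetD skills (is.1 - p) 0])
      (acc ++ [a]) = acc ++ pvWin skills p ys i0 a := by
  induction ys with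
  | nil => intro i0 acc a; simp [PySem.List.enumerate_nil, pvWin]
  | cons s t ih =>
      intro i0 acc a
      rw [PySem.List.enumerate_cons]
      simp only [List.foldl_cons, PySem.List.pyGetD_neg_one_append_singleton, pvWin]
      have := ih (i0 + 1) (acc ++ [a]) (a + s - PySem.List.pyGetD skills (i0 - p) 0)
      simpa using this

theorem pvPref_getD (xs : List Int) : ∀ (a : Int) (j : Nat), j ≤ xs.length →
    (pvPref xs a).getD j 0 = a + pvS xs j := by
  induction xs with
  | nil =>
      intro a j hj
      have hj0 : j = 0 := Nat.le_zero.mp hj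
      subst hj0
      simp [pvPref, pvS]
  | cons s t ih =>
      intro a j hj
      cases j with
      | zero => simp [pvPref, pvS]
      | succ j =>
          simp only [pvPref, List.getD_cons_succ]
          rw [ih (a + s) j (by simpa using hj)]
          simp [pvS, add_assoc]

theorem pvS_succ (skills : List Int) (k : Nat) (h : k < skills.length) :
    pvS skills (k + 1) = pvS skills k + skills.getD k 0 := by
  unfold pvS
  rw [List.take_add_one, List.sum_append, List.getElem?_eq_getElem h]
  simp [List.getD, List.getElem?_eq_getElem h]

theorem pvWin_getD_zero (skills : List Int) (p : Int) (t : List Int) (i a : Int) :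
    (pvWin skills p t i a).getD 0 0 = a := by
  cases t <;> rfl

theorem pvWin_getD (skills : List Int) (p : Int) (hp : 0 ≤ p) :
    ∀ (j m : Nat), p.toNat + m + j ≤ skills.length →
    (pvWin skills p (skills.drop (p.toNat + m)) (p + (m : Int))
        (pvS skills (p.toNat + m) - pvS skills m)).getD j 0
      = pvS skills (p.toNat + m + j) - pvS skills (m + j) := by
  intro j
  induction j with
  | zero =>
      intro m hm
      have := pvWin_getD_zero skills p (skills.drop (p.toNat + m)) (p + (m : Int))
        (pvS skills (p.toNat + m) - pvS skills m)
      simpa using this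
  | succ j ih =>
      intro m hm
      have hlt : p.toNat + m < skills.length := by omega
      have hdrop : skills.drop (p.toNat + m)
          = skills[p.toNat + m] :: skills.drop (p.toNat + m + 1) :=
        List.drop_eq_getElem_cons hlt
      rw [hdrop]
      simp only [pvWin, List.getD_cons_succ]
      have hidx : (p + (m : Int)) - p = ((m : Nat) : Int) := by ring
      rw [hidx, PySem.List.pyGetD_natCast]
      have hmlt : m < skills.length := by omega
      have hacc : pvS skills (p.toNat + m) - pvS skills m + skills[p.toNat + m] - skills.getD m 0
          = pvS skills (p.toNat + (m + 1)) - pvS skills (m + 1) := by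
        have h1 := pvS_succ skills (p.toNat + m) hlt
        have h2 := pvS_succ skills m hmlt
        have hg : skills.getD (p.toNat + m) 0 = skills[p.toNat + m] := by
          simp [List.getD, List.getElem?_eq_getElem hlt]
        rw [show p.toNat + (m + 1) = p.toNat + m + 1 by omega, h1, h2, hg]
        ring
      have hcast : p + (m : Int) + 1 = p + ((m + 1 : Nat) : Int) := by push_cast; ring
      rw [hacc, show p.toNat + m + 1 = p.toNat + (m + 1) by omega, hcast,
        ih (m + 1) (by omega)]
      congr 2 <;> omega

-- pointwise equality of the two candidate terms for every i in range(p-1, len(skills))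
theorem pv_point (n p : Int) (skills : List Int) (hp : 0 ≤ p) (hpl : p ≤ (skills.length : Int))
    (i : Int) (hi1 : p - 1 ≤ i) (hi2 : i < (skills.length : Int)) :
    PySem.List.pyGetD (pvWin skills p (skills.drop p.toNat) p (pvS skills p.toNat)) (i - (p - 1)) 0
      = PySem.List.pyGetD (pvPref skills 0) (i + 1) 0
        - PySem.List.pyGetD (pvPref skills 0) (i - p + 1) 0 := by
  set L := skills.length with hL
  have hj0 : 0 ≤ i - p + 1 := by omega
  set j : Nat := (i - p + 1).toNat with hjdef
  have hj : (j : Int) = i - p + 1 := Int.toNat_of_nonneg hj0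
  have hjle : p.toNat + j ≤ L := by omega
  have e1 : i - (p - 1) = ((j : Nat) : Int) := by rw [hj]; ring
  have e2 : i + 1 = (((p.toNat + j : Nat)) : Int) := by push_cast; omega
  have e3 : i - p + 1 = ((j : Nat) : Int) := by rw [hj]
  rw [e1, e3, e2, PySem.List.pyGetD_natCast, PySem.List.pyGetD_natCast, PySem.List.pyGetD_natCast]
  have hwin := pvWin_getD skills p hp j 0 (by omega)
  simp only [Nat.add_zero, Nat.zero_add, Int.natCast_zero, add_zero] at hwin
  have hS0 : pvS skills 0 = 0 := by simp [pvS]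
  rw [hS0, sub_zero] at hwin
  rw [hwin, pvPref_getD skills 0 (p.toNat + j) hjle, pvPref_getD skills 0 j (by omega)]
  ring

-- ===== VERDICT (by name: the statement is the Claim_ definition above) =====
theorem solve_spec : Claim_equal_solve := by
  intro n p skills hDom hPre
  obtain ⟨hp, hpl, _⟩ := hPre
  simp only [Spec_solve, solve, solve_alt]
  have hslice_to : PySem.List.slice skills none (some p) = skills.take p.toNat :=
    PySem.List.slice_to skills hp
  have hslice_from : PySem.List.slice skills (some p) none = skills.drop p.toNat :=
    PySem.List.slice_from skills hp
  have hpsums : (PySem.List.enumerate (PySem.List.slice skills (some p) none) p).foldl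
      (fun ps is => ps ++ [PySem.List.pyGetD ps (-1) 0 + is.2 - PySem.List.pyGetD skills (is.1 - p) 0])
      [(PySem.List.slice skills none (some p)).sum]
      = pvWin skills p (skills.drop p.toNat) p (pvS skills p.toNat) := by
    rw [hslice_to, hslice_from]
    have := pvWin_foldl skills p (skills.drop p.toNat) p [] ((skills.take p.toNat).sum)
    simpa [pvS] using this
  have hcum : skills.foldl (fun c s => c ++ [PySem.List.pyGetD c (-1) 0 + s]) [(0 : Int)]
      = pvPref skills 0 := by
    have := pvPref_foldl skills [] 0
    simpa using this
  rw [hpsums, hcum]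
  have hmap : ((PySem.List.pyRange (p - 1) skills.length 1).map
      (fun i => p * PySem.List.pyGetD skills i 0 -
        PySem.List.pyGetD (pvWin skills p (skills.drop p.toNat) p (pvS skills p.toNat)) (i - (p - 1)) 0))
      = ((PySem.List.pyRange (p - 1) skills.length 1).map
      (fun i => p * PySem.List.pyGetD skills i 0 -
        (PySem.List.pyGetD (pvPref skills 0) (i + 1) 0 - PySem.List.pyGetD (pvPref skills 0) (i - p + 1) 0))) := by
    apply List.map_congr_left
    intro i hi
    rw [PySem.List.mem_pyRange_one] at hi
    rw [pv_point n p skills hp hpl i hi.1 hi.2]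
  rw [hmap]
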